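-- pv_equiv track=rewrite | github.com/uygnef/COMP6714 | proj1/submission.py | Logarithmic_merge
-- ===== SOURCE A (Python) =====
-- def Logarithmic_merge(index, cut_off, buffer_size): # do not change the function heading
--     disk = [[]]
--     memory = []
--
--     def merge(i, sub_list, disk):
--         if len(disk) == i + 1:
--             disk.append([])
--         disk[i+1].append(sorted(sub_list[0] + sub_list[1]))
--         disk[i] = []
--         if len(disk[i+1]) > 1:
--             merge(i+1, disk[i+1], disk)
--
--     def merge_disk(disk):
--         if len(disk[0]) > 1:
--             merge(0, disk[0], disk)
--
--
--     for i in index[:cut_off]: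
--         memory.append(i)
--
--         if len(memory) >= buffer_size:
--             disk[0].append(sorted(memory))
--             merge_disk(disk)
--             memory = []
--
--     disk = [[memory]] + disk
--     ret = []
--     for i in disk:
--         if i:
--             ret += i
--         else:
--             ret.append(i)
--     return ret
-- ===== SOURCE B (Python) =====
-- def Logarithmic_merge(index, cut_off, buffer_size):
--     # Closed-form: the loop in A is a binary counter of flushed buffers; compute
--     # each level's run directly as sorted() of its contiguous segment of the prefix.
--     prefix = index[:cut_off]
--     c = buffer_size if buffer_size > 1 else 1
--     k = len(prefix) // c
--     out = [prefix[k * c:]]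
--     levels = k.bit_length() if k > 0 else 1
--     for i in range(levels):
--         if (k >> i) & 1:
--             start = ((k >> (i + 1)) << (i + 1)) * c
--             out.append(sorted(prefix[start:start + (1 << i) * c]))
--         else:
--             out.append([])
--     return out
-- ===== Notes on version B (the rewrite author's own statement) =====
-- stated objective: alternative
-- what changed: Replaces A's simulated logarithmic-merge cascade (a binary-counter disk of levels, repeatedly re-sorting concatenations of runs) with a closed form: compute the flush count k, read its bits, and sort each level's contiguous segment of the prefix once; intended as faster but a timing run read only 1.32x at the largest size, so no speed is claimed.
import Mathlib
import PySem

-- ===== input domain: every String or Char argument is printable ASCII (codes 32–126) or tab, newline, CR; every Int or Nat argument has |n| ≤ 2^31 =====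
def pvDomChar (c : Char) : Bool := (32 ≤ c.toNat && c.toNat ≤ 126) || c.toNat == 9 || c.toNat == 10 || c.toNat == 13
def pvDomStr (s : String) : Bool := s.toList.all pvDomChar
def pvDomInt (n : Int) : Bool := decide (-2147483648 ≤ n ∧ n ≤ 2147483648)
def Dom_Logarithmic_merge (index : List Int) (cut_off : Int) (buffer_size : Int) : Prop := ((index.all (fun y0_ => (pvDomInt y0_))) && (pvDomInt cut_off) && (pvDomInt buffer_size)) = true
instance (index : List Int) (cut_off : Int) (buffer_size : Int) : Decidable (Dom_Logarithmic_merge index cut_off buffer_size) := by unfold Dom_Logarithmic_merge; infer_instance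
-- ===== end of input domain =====

-- B replaces A's simulated logarithmic-merge cascade by a closed form over the flush-counter bits (one sorted() per level); intended as faster (measured 1.32x at the largest size, unconfirmed).


-- ===== PORT A =====
-- Python sorted(l) on ints
def sortI (l : List Int) : List Int := PySem.List.sorted l (fun x => x) false

-- merge(i, sub_list, disk): sub_list aliases disk[i]; fuel only guards totality
-- (the cascade depth is at most disk.length + 1; fuel disk.length + 2 is never exhausted)
def mergeA (fuel : Nat) (i : Nat) (disk0 : List (List (List Int))) : List (List (List Int)) :=
  match fuel with
  | 0 => disk0
  | fuel + 1 =>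
    let disk1 := if disk0.length = i + 1 then disk0 ++ [[]] else disk0
    let sub := disk1.getD i []
    let merged := sortI (sub.getD 0 [] ++ sub.getD 1 [])
    let disk2 := disk1.set (i + 1) (disk1.getD (i + 1) [] ++ [merged])
    let disk3 := disk2.set i []
    if 1 < (disk3.getD (i + 1) []).length then mergeA fuel (i + 1) disk3 else disk3

-- one iteration of A's for-loop (state = (disk, memory))
def stepA (buffer_size : Int) (st : List (List (List Int)) × List Int) (x : Int) :
    List (List (List Int)) × List Int :=
  let memory := st.2 ++ [x]
  if buffer_size ≤ (memory.length : Int) then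
    let disk := st.1.set 0 (st.1.getD 0 [] ++ [sortI memory])
    let disk := if 1 < (disk.getD 0 []).length then mergeA (disk.length + 2) 0 disk else disk
    (disk, [])
  else (st.1, memory)

def Logarithmic_merge (index : List Int) (cut_off : Int) (buffer_size : Int) : List (List Int) :=
  let pre := PySem.List.slice index none (some cut_off)   -- index[:cut_off]
  let st := pre.foldl (stepA buffer_size) ([[]], [])
  let disk := ([[st.2]] : List (List (List Int))) ++ st.1                            -- disk = [[memory]] + disk
  disk.foldl (fun ret i => if i = [] then ret ++ [([] : List Int)] else ret ++ i) []  -- ret.append(i): i is the empty run list here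

-- ===== PORT B =====
def Logarithmic_merge_alt (index : List Int) (cut_off : Int) (buffer_size : Int) : List (List Int) :=
  let pre := PySem.List.slice index none (some cut_off)
  let c : Nat := (if 1 < buffer_size then buffer_size else 1).toNat   -- c = max(buffer_size, 1), positive
  let k : Nat := pre.length / c                                       -- k = len(prefix) // c (both non-negative)
  let levels : Nat := if 0 < k then PySem.Int.bitLength (k : Int) else 1
  [pre.drop (k * c)] ++                                               -- prefix[k*c:]
    (List.range levels).map (fun i =>
      if (k >>> i) % 2 = 1 then                                       -- (k >> i) & 1
        sortI ((pre.drop (((k >>> (i + 1)) <<< (i + 1)) * c)).take ((1 <<< i) * c))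
      else [])

-- ===== PRECONDITION & SPEC =====
def Spec_Logarithmic_merge (index : List Int) (cut_off : Int) (buffer_size : Int) (out : List (List Int)) : Prop := out = Logarithmic_merge_alt index cut_off buffer_size
instance (index : List Int) (cut_off : Int) (buffer_size : Int) (out : List (List Int)) : Decidable (Spec_Logarithmic_merge index cut_off buffer_size out) := by unfold Spec_Logarithmic_merge; infer_instance

-- ===== CLAIM (what is proved, stated in full; the proofs are below) =====
def Claim_equal_Logarithmic_merge : Prop := ∀ (index : List Int) (cut_off : Int) (buffer_size : Int), Dom_Logarithmic_merge index cut_off buffer_size → Spec_Logarithmic_merge index cut_off buffer_size (Logarithmic_merge index cut_off buffer_size)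

-- ===== LEMMAS AND PROOFS =====

-- c = max(buffer_size, 1): elements consumed per flush
def cN (b : Int) : Nat := (if 1 < b then b else 1).toNat

-- Python k.bit_length() as used for the number of disk levels (at least 1)
def Lk (k : Nat) : Nat := if 0 < k then PySem.Int.bitLength (k : Int) else 1

-- level i of the binary-counter disk at counter value k
def lvl (c : Nat) (data : List Int) (k i : Nat) : List (List Int) :=
  if k / 2^i % 2 = 1 then
    [sortI ((data.drop ((k / 2^(i+1) * 2^(i+1)) * c)).take (2^i * c))]
  else []

def diskOf (c : Nat) (data : List Int) (k : Nat) : List (List (List Int)) :=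
  (List.range (Lk k)).map (lvl c data k)

-- the carry run entering level j during the cascade that increments k
def car (c : Nat) (data : List Int) (k j : Nat) : List Int :=
  sortI ((data.drop ((k + 1 - 2^j) * c)).take (2^j * c))

theorem cN_pos (b : Int) : 0 < cN b := by unfold cN; split <;> omega

theorem Lk_pos (k : Nat) : 1 ≤ Lk k := by
  unfold Lk; split
  · by_contra h
    have h0 : PySem.Int.bitLength (k : Int) = 0 := by omega
    have := PySem.Int.lt_two_pow_bitLength (k : Int)
    rw [h0] at this; simp at this; omega
  · omega

theorem lt_two_pow_Lk (k : Nat) : k < 2^(Lk k) := by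
  unfold Lk; split
  · have := PySem.Int.lt_two_pow_bitLength (k : Int)
    simpa using this
  · omega

theorem two_pow_Lk_le (k : Nat) (h : 0 < k) : 2^(Lk k - 1) ≤ k := by
  unfold Lk; rw [if_pos h]
  have := PySem.Int.two_pow_bitLength_le (k : Int) (by exact_mod_cast h.ne')
  simpa using this

theorem Lk_unique (m b : Nat) (hb : 1 ≤ b) (h1 : 2^(b-1) ≤ m) (h2 : m < 2^b) : Lk m = b := by
  have hm : 0 < m := lt_of_lt_of_le (Nat.two_pow_pos (b-1)) h1
  have hA := lt_two_pow_Lk m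
  have hB := two_pow_Lk_le m hm
  have hC := Lk_pos m
  rcases lt_trichotomy (Lk m) b with h | h | h
  · exfalso
    have : (2:Nat)^(Lk m) ≤ 2^(b-1) := Nat.pow_le_pow_right (by norm_num) (by omega)
    omega
  · exact h
  · exfalso
    have : (2:Nat)^b ≤ 2^(Lk m - 1) := Nat.pow_le_pow_right (by norm_num) (by omega)
    omega

theorem bit_lt_Lk (k i : Nat) (h : k / 2^i % 2 = 1) : i < Lk k := by
  by_contra h'
  have hle : (2:Nat)^(Lk k) ≤ 2^i := Nat.pow_le_pow_right (by norm_num) (by omega)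
  have hki : k < 2^i := lt_of_lt_of_le (lt_two_pow_Lk k) hle
  rw [Nat.div_eq_of_lt hki] at h
  simp at h

theorem sortI_perm_eq (x y : List Int) (h : x.Perm y) : sortI x = sortI y :=
  PySem.List.sorted_eq_sorted_of_perm x y (fun a => a) (fun _ _ hab => hab) h

theorem sortI_merge (x y : List Int) : sortI (sortI x ++ sortI y) = sortI (x ++ y) :=
  sortI_perm_eq _ _ ((PySem.List.sorted_perm x _ _).append (PySem.List.sorted_perm y _ _))

theorem seg_append (l : List Int) (p q r : Nat) :
    (l.drop p).take q ++ (l.drop (p+q)).take r = (l.drop p).take (q+r) := by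
  rw [List.take_add, List.drop_drop]

theorem getD_mid {α : Type} (A : List α) (X : α) (r : List α) (d : α) :
    (A ++ X :: r).getD A.length d = X := by
  simp [List.getD]

theorem getD_mid1 {α : Type} (A : List α) (X : α) (r : List α) (d : α) :
    (A ++ X :: r).getD (A.length + 1) d = r.getD 0 d := by
  simp [List.getD, List.getElem?_append_right (show A.length ≤ A.length + 1 by omega)]

theorem set_mid {α : Type} (A : List α) (X Y : α) (r : List α) :
    (A ++ X :: r).set A.length Y = A ++ Y :: r := by
  rw [List.set_append]; simp

theorem set_mid1 {α : Type} (A : List α) (X Y : α) (r : List α) :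
    (A ++ X :: r).set (A.length + 1) Y = A ++ X :: r.set 0 Y := by
  rw [List.set_append]; simp

theorem bit_of_allones (k i : Nat) (hmod : k % 2^(i+1) = 2^(i+1) - 1) : k / 2^i % 2 = 1 := by
  have h := Nat.mod_pow_succ (x := k) (b := 2) (k := i)
  have h2 : k % 2^i < 2^i := Nat.mod_lt _ (Nat.two_pow_pos i)
  have hpow : (2:Nat)^(i+1) = 2*2^i := by rw [pow_succ]; ring
  have hP : 0 < (2:Nat)^i := Nat.two_pow_pos i
  have h3 : k / 2^i % 2 = 0 ∨ k / 2^i % 2 = 1 := by omega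
  rcases h3 with h3 | h3
  · rw [h3] at h; omega
  · exact h3

theorem div_mul_eq (k j : Nat) : k / 2^j * 2^j = k - k % 2^j := by
  have h := Nat.div_add_mod k (2^j)
  have hP : 0 < (2:Nat)^j := Nat.two_pow_pos j
  rw [mul_comm]
  omega

theorem succ_bits (k j : Nat) (hmod : k % 2^j = 2^j - 1) (hbit : k / 2^j % 2 = 0) :
    (k+1) % 2^(j+1) = 2^j ∧ (k+1) / 2^(j+1) = k / 2^(j+1) ∧
    (∀ m, m < j → (k+1) / 2^m % 2 = 0) ∧ (k+1) / 2^j % 2 = 1 ∧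
    (k+1) / 2^(j+1) * 2^(j+1) = (k+1) - 2^j := by
  have hP : 0 < (2:Nat)^j := Nat.two_pow_pos j
  have hpow : (2:Nat)^(j+1) = 2*2^j := by rw [pow_succ]; ring
  have hmod1 : k % 2^(j+1) = 2^j - 1 := by
    rw [Nat.mod_pow_succ, hmod, hbit]; omega
  have hdm := Nat.div_add_mod k (2^(j+1))
  have hk1 : k + 1 = 2^(j+1) * (k / 2^(j+1)) + 2^j := by omega
  have hklow : 2^j - 1 ≤ k := by have := Nat.mod_le k (2^j); omega
  have h1 : (k+1) % 2^(j+1) = 2^j := by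
    rw [hk1, Nat.mul_add_mod, Nat.mod_eq_of_lt (show (2:Nat)^j < 2^(j+1) by omega)]
  have hx : k / 2^(j+1) * 2^(j+1) = k - (2^j - 1) := by rw [div_mul_eq, hmod1]
  have h2 : (k+1) / 2^(j+1) = k / 2^(j+1) := by
    refine Nat.div_eq_of_lt_le (by omega) ?_
    rw [add_mul, one_mul]; omega
  have h4 : (k+1) / 2^j = 2 * (k / 2^(j+1)) + 1 := by
    have hh : k + 1 = 2^j * (2 * (k / 2^(j+1)) + 1) := by rw [hk1, hpow]; ring
    rw [hh, Nat.mul_div_cancel_left _ hP]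
  have h3 : ∀ m, m < j → (k+1) / 2^m % 2 = 0 := by
    intro m hm
    obtain ⟨d, hd⟩ : ∃ d, j = m + d + 1 := ⟨j - m - 1, by omega⟩
    have hsplit : (2:Nat)^j = 2^m * 2^(d+1) := by rw [hd, pow_add]; ring
    have hsplit1 : (2:Nat)^(j+1) = 2^m * 2^(d+2) := by
      rw [hd, show m + d + 1 + 1 = m + (d+2) by omega, pow_add]
    have hval : k + 1 = 2^m * (2^(d+2) * (k / 2^(j+1)) + 2^(d+1)) := by
      rw [hk1, hsplit, hsplit1]; ring
    rw [hval, Nat.mul_div_cancel_left _ (Nat.two_pow_pos m)]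
    have e1 : (2:Nat)^(d+2) = 2*2^(d+1) := by rw [pow_succ]; ring
    have e2 : (2:Nat)^(d+1) = 2*2^d := by rw [pow_succ]; ring
    rw [e1, mul_assoc]
    omega
  exact ⟨h1, h2, h3, by omega, by rw [h2, div_mul_eq, hmod1]; omega⟩

theorem div_higher (k j m : Nat) (h : (k+1)/2^(j+1) = k/2^(j+1)) (hm : j+1 ≤ m) :
    (k+1)/2^m = k/2^m := by
  have hsplit : (2:Nat)^m = 2^(j+1) * 2^(m-(j+1)) := by
    rw [← pow_add]; congr 1; omega
  rw [hsplit, ← Nat.div_div_eq_div_mul, h, Nat.div_div_eq_div_mul]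

theorem stop_eq (c : Nat) (data : List Int) (k j : Nat)
    (hmod : k % 2^j = 2^j - 1) (hbit : k / 2^j % 2 = 0) :
    List.replicate j ([] : List (List Int)) ++ [[car c data k j]] ++
      (List.range' (j+1) (Lk k - (j+1))).map (lvl c data k) = diskOf c data (k+1) := by
  obtain ⟨hb1, hb2, hb3, hb4, hb5⟩ := succ_bits k j hmod hbit
  have hP : 0 < (2:Nat)^j := Nat.two_pow_pos j
  have hpow : (2:Nat)^(j+1) = 2*2^j := by rw [pow_succ]; ring
  have hLklt := lt_two_pow_Lk k
  have hLkpos := Lk_pos k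
  have hklow : 2^j - 1 ≤ k := by
    have := Nat.mod_le k (2^j); omega
  have hjL : j ≤ Lk k := by
    by_contra h'
    have h1 : (2:Nat)^(Lk k) ≤ 2^(j-1) := Nat.pow_le_pow_right (by norm_num) (by omega)
    have h2 : (2:Nat)^(j-1) * 2 = 2^j := by
      rw [← pow_succ]; congr 1; omega
    omega
  have hL' : Lk (k+1) = if j = Lk k then Lk k + 1 else Lk k := by
    split
    · next hje =>
      have hklt : k < 2^j := by rw [hje]; exact hLklt
      have hkval : k + 1 = 2^j := by
        have := Nat.mod_eq_of_lt hklt; omega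
      rw [hkval]
      have := Lk_unique (2^j) (j+1) (by omega) (by simp) (by omega)
      omega
    · next hjne =>
      have hjlt : j < Lk k := by omega
      have hup : k + 1 < 2^(Lk k) := by
        by_contra h'
        have he : k + 1 = 2^(Lk k) := by omega
        have hdvd : (2:Nat)^(j+1) ∣ k + 1 := he ▸ pow_dvd_pow 2 (by omega)
        have h0 : (k+1) % 2^(j+1) = 0 := Nat.mod_eq_zero_of_dvd hdvd
        omega
      have hlow : 2^(Lk k - 1) ≤ k + 1 := by
        rcases Nat.eq_zero_or_pos k with hk0 | hk0
        · have : Lk 0 = 1 := by unfold Lk; simp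
          rw [hk0, this]; simp
        · exact le_trans (two_pow_Lk_le k hk0) (by omega)
      exact Lk_unique _ _ hLkpos hlow hup
  have hjL' : j < Lk (k+1) := by split at hL' <;> omega
  have htail : Lk (k+1) - (j+1) = Lk k - (j+1) := by split at hL' <;> omega
  -- split the range underlying diskOf (k+1) into [0,j), {j}, [j+1, Lk (k+1))
  have hsplit : List.range (Lk (k+1)) =
      List.range' 0 j ++ [j] ++ List.range' (j+1) (Lk (k+1) - (j+1)) := by
    obtain ⟨n, hn⟩ : ∃ n, Lk (k+1) - (j+1) = n := ⟨_, rfl⟩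
    have h1 : Lk (k+1) = j + (1 + n) := by omega
    have e1 : List.range' 0 (j + (1 + n)) = List.range' 0 j ++ List.range' j (1 + n) := by
      simpa using (List.range'_append (s := 0) (m := j) (n := 1+n) (step := 1)).symm
    have e2 : List.range' j (1 + n) = j :: List.range' (j+1) n := by
      rw [Nat.add_comm 1 n, List.range'_succ]
    rw [List.range_eq_range', h1, e1, e2]
    rw [show j + (1 + n) - (j+1) = n by omega]
    simp
  unfold diskOf
  rw [hsplit, List.map_append, List.map_append]
  congr 1
  congr 1
  · -- levels below j are empty in diskOf (k+1)
    symm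
    apply List.eq_replicate_iff.mpr
    refine ⟨by simp, ?_⟩
    intro b hb
    obtain ⟨m, hm, rfl⟩ := List.mem_map.mp hb
    have hmj : m < j := by
      have := List.mem_range'_1.mp hm; omega
    unfold lvl
    rw [if_neg (by rw [hb3 m hmj]; omega)]
  · -- level j carries the fully merged run
    unfold lvl
    rw [List.map_singleton, if_pos hb4, hb5]
    rfl
  · -- levels above j are unchanged
    rw [htail]
    apply List.map_congr_left
    intro m hm
    have hmj : j + 1 ≤ m := (List.mem_range'_1.mp hm).1
    unfold lvl
    rw [div_higher k j m hb2 hmj, div_higher k j (m+1) hb2 (by omega)]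

theorem mergeA_mid (c : Nat) (data : List Int) (k : Nat) :
    ∀ fuel i, Lk k - i < fuel → k % 2^(i+1) = 2^(i+1) - 1 →
    mergeA fuel i (List.replicate i ([] : List (List Int)) ++
        (lvl c data k i ++ [car c data k i]) ::
        (List.range' (i+1) (Lk k - (i+1))).map (lvl c data k)) = diskOf c data (k+1) := by
  intro fuel
  induction fuel with
  | zero => intro i h; exact absurd h (by omega)
  | succ f ih =>
    intro i hfuel hmod
    have hpow : (2:Nat)^(i+1) = 2*2^i := by rw [pow_succ]; ring
    have hP : 0 < (2:Nat)^i := Nat.two_pow_pos i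
    have hbit : k / 2^i % 2 = 1 := bit_of_allones k i hmod
    have hiL : i < Lk k := bit_lt_Lk k i hbit
    have hklow : 2^(i+1) - 1 ≤ k := by
      have := Nat.mod_le k (2^(i+1)); omega
    have hstart : k / 2^(i+1) * 2^(i+1) = k + 1 - 2^(i+1) := by
      rw [div_mul_eq, hmod]; omega
    have hlvl : lvl c data k i = [sortI ((data.drop ((k+1-2^(i+1)) * c)).take (2^i * c))] := by
      unfold lvl; rw [if_pos hbit, hstart]
    have hmerge : sortI (sortI ((data.drop ((k+1-2^(i+1))*c)).take (2^i*c)) ++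
        sortI ((data.drop ((k+1-2^i)*c)).take (2^i*c))) = car c data k (i+1) := by
      rw [sortI_merge]
      unfold car
      congr 1
      rw [show (k+1-2^i)*c = (k+1-2^(i+1))*c + 2^i*c by rw [← add_mul]; congr 1; omega,
          seg_append, ← add_mul]
      congr 2
      omega
    set A := List.replicate i ([] : List (List Int)) with hA
    have hAlen : A.length = i := by simp [hA]
    set X := lvl c data k i ++ [car c data k i] with hX
    have hXval : X = [sortI ((data.drop ((k+1-2^(i+1)) * c)).take (2^i * c)), car c data k i] := by
      rw [hX, hlvl]; rfl
    have hXgd : sortI (X.getD 0 [] ++ X.getD 1 []) = car c data k (i+1) := by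
      rw [hXval]
      simp only [List.getD_cons_zero, List.getD_cons_succ]
      exact hmerge
    rcases Nat.lt_or_ge (i+1) (Lk k) with hin | htop
    · -- inner level: no new level is appended
      have hrange : List.range' (i+1) (Lk k - (i+1)) =
          (i+1) :: List.range' (i+2) (Lk k - (i+2)) := by
        rw [show Lk k - (i+1) = (Lk k - (i+2)) + 1 by omega, List.range'_succ]
      rw [hrange]
      simp only [List.map_cons]
      set rest := (List.range' (i+2) (Lk k - (i+2))).map (lvl c data k) with hrest
      set Y := lvl c data k (i+1) with hY
      rw [mergeA]
      have hcond : ¬ ((A ++ X :: Y :: rest).length = i + 1) := by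
        simp [hAlen]
      rw [if_neg hcond]
      have hgm : (A ++ X :: Y :: rest).getD i [] = X := by
        have := getD_mid A X (Y :: rest) ([] : List (List Int)); rwa [hAlen] at this
      rw [hgm, hXgd]
      have hgm1 : (A ++ X :: Y :: rest).getD (i+1) [] = Y := by
        have := getD_mid1 A X (Y :: rest) ([] : List (List Int)); rw [hAlen] at this
        simpa using this
      rw [hgm1]
      have hsm1 : (A ++ X :: Y :: rest).set (i+1) (Y ++ [car c data k (i+1)]) =
          A ++ X :: (Y ++ [car c data k (i+1)]) :: rest := by
        have := set_mid1 A X (Y ++ [car c data k (i+1)]) (Y :: rest); rw [hAlen] at this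
        simpa using this
      rw [hsm1]
      have hsm : (A ++ X :: (Y ++ [car c data k (i+1)]) :: rest).set i [] =
          A ++ ([] : List (List Int)) :: (Y ++ [car c data k (i+1)]) :: rest := by
        have := set_mid A X ([] : List (List Int)) ((Y ++ [car c data k (i+1)]) :: rest)
        rwa [hAlen] at this
      rw [hsm]
      have hgm1' : (A ++ ([] : List (List Int)) :: (Y ++ [car c data k (i+1)]) :: rest).getD (i+1) [] =
          Y ++ [car c data k (i+1)] := by
        have := getD_mid1 A ([] : List (List Int)) ((Y ++ [car c data k (i+1)]) :: rest)
          ([] : List (List Int))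
        rw [hAlen] at this
        simpa using this
      rw [hgm1']
      have hrep : A ++ ([] : List (List Int)) :: (Y ++ [car c data k (i+1)]) :: rest =
          List.replicate (i+1) ([] : List (List Int)) ++ (Y ++ [car c data k (i+1)]) :: rest := by
        rw [List.replicate_succ', hA]
        simp
      have hb2 : k / 2^(i+1) % 2 = 0 ∨ k / 2^(i+1) % 2 = 1 := by omega
      rcases hb2 with hbit0 | hbit1
      · -- next bit clear: the carry settles at level i+1
        have hlvl1 : Y = [] := by rw [hY]; unfold lvl; rw [if_neg (by omega)]
        rw [hlvl1]
        rw [if_neg (by simp)]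
        rw [hlvl1] at hrep
        rw [hrep, hrest]
        simp only [List.nil_append]
        have := stop_eq c data k (i+1) hmod hbit0
        simpa [List.append_assoc] using this
      · -- next bit set: the cascade continues
        have hmod' : k % 2^(i+2) = 2^(i+2) - 1 := by
          have hms := Nat.mod_pow_succ (x := k) (b := 2) (k := i+1)
          have hpow2 : (2:Nat)^(i+2) = 2*2^(i+1) := by rw [pow_succ]; ring
          rw [hms, hmod, hbit1]; omega
        have hlvl1 : Y ≠ [] := by rw [hY]; unfold lvl; rw [if_pos hbit1]; simp
        rw [if_pos (by
          rcases hne : Y with _ | ⟨a, tl⟩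
          · exact absurd hne hlvl1
          · simp)]
        rw [hrep, hrest, hY]
        have := ih (i+1) (by omega) hmod'
        simpa [List.append_assoc] using this
    · -- top level: a fresh level is appended and the carry settles there
      have htopeq : Lk k = i + 1 := by omega
      have hrange : List.range' (i+1) (Lk k - (i+1)) = [] := by
        rw [htopeq]; simp
      rw [hrange]
      simp only [List.map_nil]
      rw [mergeA]
      have hcond : (A ++ X :: []).length = i + 1 := by simp [hAlen]
      rw [if_pos hcond]
      have hd : (A ++ X :: []) ++ [([] : List (List Int))] = A ++ X :: [[]] := by simp
      rw [hd]
      have hgm : (A ++ X :: [[]]).getD i [] = X := by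
        have := getD_mid A X ([([] : List (List Int))]) ([] : List (List Int))
        rwa [hAlen] at this
      rw [hgm, hXgd]
      have hgm1 : (A ++ X :: [[]]).getD (i+1) [] = ([] : List (List Int)) := by
        have := getD_mid1 A X ([([] : List (List Int))]) ([] : List (List Int))
        rw [hAlen] at this
        simpa using this
      rw [hgm1]
      simp only [List.nil_append]
      have hsm1 : (A ++ X :: [[]]).set (i+1) [car c data k (i+1)] =
          A ++ X :: [[car c data k (i+1)]] := by
        have := set_mid1 A X ([car c data k (i+1)]) ([([] : List (List Int))])
        rw [hAlen] at this
        simpa using this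
      rw [hsm1]
      have hsm : (A ++ X :: [[car c data k (i+1)]]).set i [] =
          A ++ ([] : List (List Int)) :: [[car c data k (i+1)]] := by
        have := set_mid A X ([] : List (List Int)) ([[car c data k (i+1)]])
        rwa [hAlen] at this
      rw [hsm]
      have hgm1' : (A ++ ([] : List (List Int)) :: [[car c data k (i+1)]]).getD (i+1) [] =
          [car c data k (i+1)] := by
        have := getD_mid1 A ([] : List (List Int)) ([[car c data k (i+1)]]) ([] : List (List Int))
        rw [hAlen] at this
        simpa using this
      rw [hgm1']
      rw [if_neg (by simp)]
      have hbit0 : k / 2^(i+1) % 2 = 0 := by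
        have hlt : k < 2^(i+1) := by rw [← htopeq]; exact lt_two_pow_Lk k
        rw [Nat.div_eq_of_lt hlt]
      have hrep : A ++ ([] : List (List Int)) :: [[car c data k (i+1)]] =
          List.replicate (i+1) ([] : List (List Int)) ++ [[car c data k (i+1)]] ++
          (List.range' (i+2) (Lk k - (i+2))).map (lvl c data k) := by
        rw [List.replicate_succ', hA]
        simp [htopeq]
      rw [hrep]
      have := stop_eq c data k (i+1) hmod hbit0
      simpa [List.append_assoc] using this

theorem diskOf_zero (c : Nat) (data : List Int) : diskOf c data 0 = [[]] := by
  unfold diskOf Lk lvl; simp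

set_option maxHeartbeats 1000000 in
theorem flush_eq (c : Nat) (data : List Int) (k : Nat) (d0 : List (List (List Int)))
    (hd0 : d0 = (diskOf c data k).set 0 ((diskOf c data k).getD 0 [] ++ [car c data k 0])) :
    (if 1 < (d0.getD 0 []).length then mergeA (d0.length + 2) 0 d0 else d0) =
    diskOf c data (k+1) := by
  have hLkpos := Lk_pos k
  have hexp : diskOf c data k = lvl c data k 0 :: (List.range' 1 (Lk k - 1)).map (lvl c data k) := by
    unfold diskOf
    rw [List.range_eq_range', show Lk k = 1 + (Lk k - 1) by omega, ← List.range'_append]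
    simp
  have hd0' : d0 = (lvl c data k 0 ++ [car c data k 0]) ::
      (List.range' 1 (Lk k - 1)).map (lvl c data k) := by
    rw [hd0, hexp]; simp
  have hlen : d0.length = Lk k := by rw [hd0']; simp; omega
  have hb01 : k / 2^0 % 2 = 0 ∨ k / 2^0 % 2 = 1 := by omega
  rcases hb01 with hb0 | hb1
  · -- k even: the new run settles at level 0
    have hlvl0 : lvl c data k 0 = [] := by unfold lvl; rw [if_neg (by omega)]
    rw [hd0', hlvl0]
    rw [if_neg (by simp)]
    have := stop_eq c data k 0 (by simp [Nat.mod_one]) hb0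
    simpa using this
  · -- k odd: a cascade starts at level 0
    have hlvl0 : lvl c data k 0 ≠ [] := by unfold lvl; rw [if_pos hb1]; simp
    rw [if_pos (by
      rw [hd0']
      rcases hne : lvl c data k 0 with _ | ⟨a, tl⟩
      · exact absurd hne hlvl0
      · simp)]
    have hmid := mergeA_mid c data k (d0.length + 2) 0 (by rw [hlen]; omega)
      (by simpa using hb1)
    rw [hd0'] at hmid
    rw [hd0']
    simpa using hmid
theorem flush_iff (b : Int) (r : Nat) (hr : r < cN b) : (b ≤ ((r : Int) + 1)) ↔ r + 1 = cN b := by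
  unfold cN at *
  split at hr
  · next h1 => constructor <;> intro h <;> omega
  · next h1 => constructor <;> intro h <;> omega

theorem loop_inv (b : Int) (data : List Int) :
    ∀ t, t ≤ data.length →
    (data.take t).foldl (stepA b) ([[]], []) =
      (diskOf (cN b) data (t / cN b), (data.drop (t / cN b * cN b)).take (t % cN b)) := by
  intro t
  induction t with
  | zero => intro _; simp [diskOf_zero]
  | succ t ih =>
    intro ht
    have htl : t < data.length := by omega
    have hc := cN_pos b
    rw [List.take_add_one, List.getElem?_eq_getElem htl]
    simp only [Option.toList_some]
    rw [List.foldl_append, ih (by omega)]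
    simp only [List.foldl_cons, List.foldl_nil]
    have hdm := Nat.div_add_mod t (cN b)
    have hcc : t / cN b * cN b = cN b * (t / cN b) := Nat.mul_comm _ _
    have hrc : t % cN b < cN b := Nat.mod_lt _ hc
    have hmemfull : (data.drop (t / cN b * cN b)).take (t % cN b) ++ [data[t]] =
        (data.drop (t / cN b * cN b)).take (t % cN b + 1) := by
      rw [List.take_add_one, List.getElem?_drop,
          show t / cN b * cN b + t % cN b = t by omega, List.getElem?_eq_getElem htl]
      rfl
    have hmemlen : ((data.drop (t / cN b * cN b)).take (t % cN b)).length = t % cN b := by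
      simp; omega
    unfold stepA
    simp only [List.length_append, List.length_singleton, hmemlen]
    by_cases hfl : t % cN b + 1 = cN b
    · -- the buffer is full: flush and cascade
      rw [if_pos (by
        have := (flush_iff b (t % cN b) hrc).mpr hfl
        push_cast
        push_cast at this
        omega)]
      have hsort : sortI ((data.drop (t / cN b * cN b)).take (t % cN b) ++ [data[t]]) =
          car (cN b) data (t / cN b) 0 := by
        rw [hmemfull, hfl]
        unfold car
        simp
      have he1 : (t / cN b + 1) * cN b = t / cN b * cN b + cN b := by ring
      have he2 : (t / cN b + 1 + 1) * cN b = t / cN b * cN b + cN b + cN b := by ring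
      have hdiv : (t+1) / cN b = t / cN b + 1 := Nat.div_eq_of_lt_le (by omega) (by omega)
      have hmod : (t+1) % cN b = 0 := by
        have := Nat.div_add_mod (t+1) (cN b)
        rw [hdiv] at this
        rw [mul_add, mul_one] at this
        omega
      rw [hdiv, hmod]
      simp only [List.take_zero]
      rw [hsort]
      simp only [Prod.mk.injEq]
      exact ⟨flush_eq _ _ _ _ rfl, trivial⟩
    · rw [if_neg (by
        have := (flush_iff b (t % cN b) hrc)
        push_cast
        push_cast at this
        omega)]
      have he1 : (t / cN b + 1) * cN b = t / cN b * cN b + cN b := by ring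
      have hdiv : (t+1) / cN b = t / cN b := Nat.div_eq_of_lt_le (by omega) (by omega)
      have hmod : (t+1) % cN b = t % cN b + 1 := by
        have := Nat.div_add_mod (t+1) (cN b)
        rw [hdiv] at this
        omega
      rw [hdiv, hmod, hmemfull]

theorem flatMap_eq_map {α β : Type} (f : α → List β) (h : α → β) (l : List α)
    (hfh : ∀ x ∈ l, f x = [h x]) : l.flatMap f = l.map h := by
  induction l with
  | nil => rfl
  | cons a l ih =>
    simp only [List.flatMap_cons, List.map_cons, hfh a (by simp)]
    rw [ih (fun x hx => hfh x (by simp [hx]))]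
    rfl

theorem flat_fold (ls : List (List (List Int))) (acc : List (List Int)) :
    ls.foldl (fun ret i => if i = [] then ret ++ [([] : List Int)] else ret ++ i) acc =
      acc ++ ls.flatMap (fun i => if i = [] then [([] : List Int)] else i) := by
  have hfun : (fun (ret : List (List Int)) i => if i = [] then ret ++ [([] : List Int)] else ret ++ i) =
      (fun ret i => ret ++ (if i = [] then [([] : List Int)] else i)) := by
    funext ret i; split <;> rfl
  rw [hfun, PySem.List.foldl_append_eq_flatMap]

-- ===== VERDICT (by name: the statement is the Claim_ definition above) =====
theorem Logarithmic_merge_spec : Claim_equal_Logarithmic_merge := by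
  intro index cut_off b _
  unfold Spec_Logarithmic_merge Logarithmic_merge Logarithmic_merge_alt
  dsimp only
  rw [show (if 1 < b then b else 1).toNat = cN b from rfl]
  rw [show (if 0 < (PySem.List.slice index none (some cut_off)).length / cN b
      then PySem.Int.bitLength (((PySem.List.slice index none (some cut_off)).length / cN b : Nat) : Int)
      else 1) = Lk ((PySem.List.slice index none (some cut_off)).length / cN b) from rfl]
  have hloop := loop_inv b (PySem.List.slice index none (some cut_off))
    ((PySem.List.slice index none (some cut_off)).length) (le_refl _)
  rw [List.take_length] at hloop
  rw [hloop]
  set pre := PySem.List.slice index none (some cut_off) with hpre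
  set c := cN b with hc
  set k := pre.length / c with hk
  have hc0 : 0 < c := cN_pos b
  have hdm := Nat.div_add_mod pre.length c
  rw [← hk] at hdm
  have hcc : k * c = c * k := Nat.mul_comm _ _
  have hmem : (pre.drop (k * c)).take (pre.length % c) = pre.drop (k * c) := by
    apply List.take_of_length_le
    have h1 : (pre.drop (k * c)).length = pre.length - k * c := by simp
    rw [h1]
    omega
  rw [hmem, flat_fold]
  have hfm : (diskOf c pre k).flatMap (fun i => if i = [] then [([] : List Int)] else i) =
      ((List.range (Lk k)).map (lvl c pre k)).map (fun x => x.headD []) := by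
    apply flatMap_eq_map
    intro x hx
    obtain ⟨i, _, rfl⟩ := List.mem_map.mp hx
    unfold lvl
    split
    · simp
    · simp
  have hsplit2 : ([[pre.drop (k*c)]] ++ diskOf c pre k).flatMap
      (fun i => if i = [] then [([] : List Int)] else i) =
      [pre.drop (k*c)] ++ (diskOf c pre k).flatMap
        (fun i => if i = [] then [([] : List Int)] else i) := by
    simp
  rw [hsplit2, hfm, List.map_map]
  simp only [List.nil_append]
  congr 1
  apply List.map_congr_left
  intro i _
  simp only [Function.comp]
  unfold lvl
  simp only [Nat.shiftRight_eq_div_pow, Nat.shiftLeft_eq, one_mul]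
  split
  · simp
  · simp
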